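-- pv_equiv track=rewrite | github.com/ybyo/ps | src/programmers/120843/120843.py | solution
-- ===== SOURCE A (Python) =====
-- def solution(numbers, k):
--     ans = 0
--     i = 0
--     k -= 1
--
--     while k:
--         i += 2
--         i %= len(numbers)
--         k -= 1
--
--     return numbers[i]
-- ===== SOURCE B (Python) =====
-- def solution(numbers, k):
--     return numbers[2 * (k - 1) % len(numbers)]
-- ===== Notes on version B (the rewrite author's own statement) =====
-- stated objective: faster
-- what changed: replaced the O(k) step-by-step index walk (i += 2 mod len, k-1 times) with the closed-form index 2*(k-1) % len(numbers)
import Mathlib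
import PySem

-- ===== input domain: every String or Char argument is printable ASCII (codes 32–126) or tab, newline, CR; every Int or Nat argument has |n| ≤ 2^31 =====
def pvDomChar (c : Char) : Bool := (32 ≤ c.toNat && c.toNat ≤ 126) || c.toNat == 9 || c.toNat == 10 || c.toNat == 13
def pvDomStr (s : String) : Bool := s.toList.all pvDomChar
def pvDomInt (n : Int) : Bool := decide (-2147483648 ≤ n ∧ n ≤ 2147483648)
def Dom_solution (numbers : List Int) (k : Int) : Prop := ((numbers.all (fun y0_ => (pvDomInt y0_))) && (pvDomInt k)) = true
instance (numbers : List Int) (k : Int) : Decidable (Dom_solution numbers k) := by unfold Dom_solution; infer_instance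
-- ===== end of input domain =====

-- B replaces A's O(k) step-by-step index walk with the closed-form index 2*(k-1) % len (objective: faster).

-- ===== PORT A =====
-- the while loop: runs while k ≠ 0, each pass i := (i+2) % len; under Pre_ (k ≥ 1 at entry,
-- i.e. k-1 ≥ 0 after the decrement) it runs exactly (k-1).toNat times, which is the fuel here
def solutionLoop : Nat → Int → Int → Int
  | 0, _, i => i
  | n + 1, len, i => solutionLoop n len (PySem.Int.mod (i + 2) len)

def solution (numbers : List Int) (k : Int) : Int :=
  let i := solutionLoop (k - 1).toNat numbers.length 0
  PySem.List.pyGetD numbers i 0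

-- ===== PORT B =====
def solution_alt (numbers : List Int) (k : Int) : Int :=
  PySem.List.pyGetD numbers (PySem.Int.mod (2 * (k - 1)) numbers.length) 0

-- ===== PRECONDITION & SPEC =====
-- A loops forever when k ≤ 0 (k becomes negative and never reaches 0) and raises
-- (IndexError or ZeroDivisionError) on the empty list; Pre_ excludes exactly those inputs.
def Pre_solution (numbers : List Int) (k : Int) : Prop := numbers ≠ [] ∧ 1 ≤ k
instance (numbers : List Int) (k : Int) : Decidable (Pre_solution numbers k) := by
  unfold Pre_solution; infer_instance

def pvWitness_solution : List Int × Int := ([4, 7, 12, 5, 6], 5)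

def Spec_solution (numbers : List Int) (k : Int) (out : Int) : Prop := out = solution_alt numbers k
instance (numbers : List Int) (k : Int) (out : Int) : Decidable (Spec_solution numbers k out) := by
  unfold Spec_solution; infer_instance

-- ===== CLAIM (what is proved, stated in full; the proofs are below) =====
def Claim_equal_solution : Prop := ∀ (numbers : List Int) (k : Int), Dom_solution numbers k → Pre_solution numbers k → Spec_solution numbers k (solution numbers k)

-- ===== LEMMAS AND PROOFS =====
theorem solutionLoop_closed (n : Nat) (len i : Int) (hlen : 0 < len)
    (h0 : 0 ≤ i) (h1 : i < len) :
    solutionLoop n len i = PySem.Int.mod (i + 2 * n) len := by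
  induction n generalizing i with
  | zero =>
    simp [solutionLoop, PySem.Int.mod_eq_emod_of_pos hlen, Int.emod_eq_of_lt h0 h1]
  | succ n ih =>
    have h2 : solutionLoop (n + 1) len i
        = solutionLoop n len (PySem.Int.mod (i + 2) len) := rfl
    rw [h2, ih _ (PySem.Int.mod_nonneg _ hlen) (PySem.Int.mod_lt _ hlen)]
    rw [PySem.Int.mod_eq_emod_of_pos hlen, PySem.Int.mod_eq_emod_of_pos hlen,
        PySem.Int.mod_eq_emod_of_pos hlen, Int.emod_add_emod]
    ring_nf
    push_cast
    ring_nf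

theorem solution_spec : Claim_equal_solution := by
  intro numbers k _ hpre
  obtain ⟨hne, hk⟩ := hpre
  have hlen : (0 : Int) < numbers.length := by
    have : numbers.length ≠ 0 := by simpa using List.length_pos_iff.mpr hne |>.ne'
    omega
  have hcast : ((k - 1).toNat : Int) = k - 1 := Int.toNat_of_nonneg (by omega)
  unfold Spec_solution solution solution_alt
  rw [solutionLoop_closed _ _ _ hlen le_rfl hlen, hcast]
  ring_nf
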